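-- pv_equiv track=rewrite | github.com/boburtolanov2001-create/dispatch-system | app.py | extract_safelane_status
-- ===== SOURCE A (Python) =====
-- SAFE_LANE_STATUS_CODE_MAP = {
--     "DS_D": "DRIVING",
--     "DS_SB": "SLEEPER",
--     "DS_OFF": "OFF DUTY",
--     "DS_ON": "ON DUTY",
--     "DS_YM": "YARD MOVE",
--     "DS_PC": "PERSONAL CONVEYANCE",
-- }
--
-- def canonical_status_text(value):
--     raw_value = str(value or "").strip().upper()
--     if not raw_value:
--         return ""
--
--     if raw_value in SAFE_LANE_STATUS_CODE_MAP:
--         return SAFE_LANE_STATUS_CODE_MAP[raw_value]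
--     if raw_value in {"D", "DRIVE", "DRIVING"}:
--         return "DRIVING"
--     if raw_value in {"SB", "SLEEPER", "SLEEPER BERTH"}:
--         return "SLEEPER"
--     if raw_value in {"OFF", "OFF DUTY"}:
--         return "OFF DUTY"
--     if raw_value in {"ON", "ON DUTY"}:
--         return "ON DUTY"
--     if raw_value in {"YM", "YARD MOVE"}:
--         return "YARD MOVE"
--     if raw_value in {"PC", "PERSONAL CONVEYANCE"}:
--         return "PERSONAL CONVEYANCE"
--     return raw_value
--
-- def extract_safelane_status(driver):
--     status_candidates = [
--         driver.get("code"),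
--         driver.get("status"),
--         driver.get("duty_status"),
--         driver.get("dutyStatus"),
--         driver.get("current_status"),
--         driver.get("currentStatus"),
--         driver.get("log_status"),
--         driver.get("hos_status"),
--     ]
--
--     for candidate in status_candidates:
--         normalized = canonical_status_text(candidate)
--         if normalized:
--             return normalized
--
--     connection_status = str(driver.get("connection_status", "")).strip().upper()
--     if connection_status == "CONNECTED":
--         return "ON DUTY"
--
--     return ""
-- ===== SOURCE B (Python) =====
-- _STATUS_ALIASES = {
--     "DS_D": "DRIVING", "DS_SB": "SLEEPER", "DS_OFF": "OFF DUTY",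
--     "DS_ON": "ON DUTY", "DS_YM": "YARD MOVE", "DS_PC": "PERSONAL CONVEYANCE",
--     "D": "DRIVING", "DRIVE": "DRIVING", "DRIVING": "DRIVING",
--     "SB": "SLEEPER", "SLEEPER": "SLEEPER", "SLEEPER BERTH": "SLEEPER",
--     "OFF": "OFF DUTY", "OFF DUTY": "OFF DUTY",
--     "ON": "ON DUTY", "ON DUTY": "ON DUTY",
--     "YM": "YARD MOVE", "YARD MOVE": "YARD MOVE",
--     "PC": "PERSONAL CONVEYANCE", "PERSONAL CONVEYANCE": "PERSONAL CONVEYANCE",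
-- }
--
-- # slot index for each relevant key, in the priority order; 8 = connection_status
-- _SLOT = {"code": 0, "status": 1, "duty_status": 2, "dutyStatus": 3,
--          "current_status": 4, "currentStatus": 5, "log_status": 6,
--          "hos_status": 7, "connection_status": 8}
--
-- def extract_safelane_status(driver):
--     # one pass over the driver's items, dropping irrelevant keys into a
--     # fixed positional accumulator (first value seen per slot wins)
--     slots = [None] * 9
--     for key, value in driver.items():
--         i = _SLOT.get(key)
--         if i is not None and slots[i] is None:
--             slots[i] = value
--     for v in slots[:8]:
--         raw = str(v or "").strip().upper()
--         if raw:
--             return _STATUS_ALIASES.get(raw, raw)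
--     if str(slots[8] or "").strip().upper() == "CONNECTED":
--         return "ON DUTY"
--     return ""
-- ===== Notes on version B (the rewrite author's own statement) =====
-- stated objective: alternative
-- what changed: B inverts the traversal: instead of probing the dict with eight keyed get() calls and canonicalizing each candidate through a six-branch if-cascade, it makes one pass over driver.items() collecting relevant values into a fixed positional slot array, then scans the slots through a single flat alias table (valid because the alias sets are mutually disjoint and first-match per slot equals dict lookup).
import Mathlib
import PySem

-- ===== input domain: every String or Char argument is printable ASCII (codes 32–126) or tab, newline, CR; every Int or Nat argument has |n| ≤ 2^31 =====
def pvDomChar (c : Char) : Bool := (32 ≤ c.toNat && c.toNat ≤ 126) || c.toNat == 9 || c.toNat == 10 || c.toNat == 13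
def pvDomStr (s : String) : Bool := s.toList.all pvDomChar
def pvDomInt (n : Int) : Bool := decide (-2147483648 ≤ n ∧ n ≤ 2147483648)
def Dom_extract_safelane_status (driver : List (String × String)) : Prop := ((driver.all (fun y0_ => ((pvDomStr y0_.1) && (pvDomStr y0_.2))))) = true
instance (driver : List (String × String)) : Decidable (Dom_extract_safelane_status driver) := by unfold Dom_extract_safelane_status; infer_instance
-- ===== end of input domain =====

-- B inverts the traversal: one pass over the driver's items into a fixed positional
-- accumulator (instead of eight keyed lookups), then a scan of the slots through one
-- flat alias table (instead of the per-value if-cascade). Objective: alternative.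

-- ===== PORT A =====
def SAFE_LANE_STATUS_CODE_MAP : PySem.Dict String String := PySem.Dict.mk
  [("DS_D", "DRIVING"), ("DS_SB", "SLEEPER"), ("DS_OFF", "OFF DUTY"),
   ("DS_ON", "ON DUTY"), ("DS_YM", "YARD MOVE"), ("DS_PC", "PERSONAL CONVEYANCE")]

-- str(value or "").strip().upper() for value : Option String (dict values are strings)
def canonical_status_text (value : Option String) : String :=
  let raw_value := PySem.Str.upper (PySem.Str.strip (value.getD ""))
  if raw_value = "" then ""
  else if SAFE_LANE_STATUS_CODE_MAP.contains raw_value then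
    SAFE_LANE_STATUS_CODE_MAP.getD raw_value ""
  else if raw_value = "D" ∨ raw_value = "DRIVE" ∨ raw_value = "DRIVING" then "DRIVING"
  else if raw_value = "SB" ∨ raw_value = "SLEEPER" ∨ raw_value = "SLEEPER BERTH" then "SLEEPER"
  else if raw_value = "OFF" ∨ raw_value = "OFF DUTY" then "OFF DUTY"
  else if raw_value = "ON" ∨ raw_value = "ON DUTY" then "ON DUTY"
  else if raw_value = "YM" ∨ raw_value = "YARD MOVE" then "YARD MOVE"
  else if raw_value = "PC" ∨ raw_value = "PERSONAL CONVEYANCE" then "PERSONAL CONVEYANCE"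
  else raw_value

-- the for-loop over the candidate list; afterwards the connection_status fallback
def extractLoopA (d : PySem.Dict String String) : List (Option String) → String
  | [] =>
      let connection_status := PySem.Str.upper (PySem.Str.strip (d.getD "connection_status" ""))
      if connection_status = "CONNECTED" then "ON DUTY" else ""
  | c :: cs =>
      let normalized := canonical_status_text c
      if normalized ≠ "" then normalized else extractLoopA d cs

def extract_safelane_status (driver : List (String × String)) : String :=
  let d := PySem.Dict.mk driver
  extractLoopA d
    [d.get? "code", d.get? "status", d.get? "duty_status", d.get? "dutyStatus",
     d.get? "current_status", d.get? "currentStatus", d.get? "log_status", d.get? "hos_status"]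

-- ===== PORT B =====
def STATUS_ALIASES : PySem.Dict String String := PySem.Dict.mk
  [("DS_D", "DRIVING"), ("DS_SB", "SLEEPER"), ("DS_OFF", "OFF DUTY"),
   ("DS_ON", "ON DUTY"), ("DS_YM", "YARD MOVE"), ("DS_PC", "PERSONAL CONVEYANCE"),
   ("D", "DRIVING"), ("DRIVE", "DRIVING"), ("DRIVING", "DRIVING"),
   ("SB", "SLEEPER"), ("SLEEPER", "SLEEPER"), ("SLEEPER BERTH", "SLEEPER"),
   ("OFF", "OFF DUTY"), ("OFF DUTY", "OFF DUTY"),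
   ("ON", "ON DUTY"), ("ON DUTY", "ON DUTY"),
   ("YM", "YARD MOVE"), ("YARD MOVE", "YARD MOVE"),
   ("PC", "PERSONAL CONVEYANCE"), ("PERSONAL CONVEYANCE", "PERSONAL CONVEYANCE")]

def SLOT : PySem.Dict String Nat := PySem.Dict.mk
  [("code", 0), ("status", 1), ("duty_status", 2), ("dutyStatus", 3),
   ("current_status", 4), ("currentStatus", 5), ("log_status", 6),
   ("hos_status", 7), ("connection_status", 8)]

-- the single pass: 'for key, value in driver.items(): …' (first value per slot wins;
-- assoc-list duplicates keep the first occurrence, matching Python dict lookup)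
def collectSlots : List (String × String) → List (Option String) → List (Option String)
  | [], slots => slots
  | (k, v) :: rest, slots =>
      match SLOT.get? k with
      | some i =>
          if slots.getD i none = none then collectSlots rest (slots.set i (some v))
          else collectSlots rest slots
      | none => collectSlots rest slots

-- 'for v in slots[:8]: …' then the slots[8] connection fallback
def scanSlotsB : List (Option String) → Option String → String
  | [], conn =>
      if PySem.Str.upper (PySem.Str.strip (conn.getD "")) = "CONNECTED" then "ON DUTY" else ""
  | v :: vs, conn =>
      let raw := PySem.Str.upper (PySem.Str.strip (v.getD ""))
      if raw ≠ "" then STATUS_ALIASES.getD raw raw else scanSlotsB vs conn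

def extract_safelane_status_alt (driver : List (String × String)) : String :=
  let slots := collectSlots driver (List.replicate 9 none)
  -- slots always has length 9, so slots[8] is in range (getD none is never used)
  scanSlotsB (PySem.List.slice slots none (some 8)) (((PySem.List.pyGet? slots 8).getD none))

-- ===== PRECONDITION & SPEC =====
def Spec_extract_safelane_status (driver : List (String × String)) (out : String) : Prop := out = extract_safelane_status_alt driver
instance (driver : List (String × String)) (out : String) : Decidable (Spec_extract_safelane_status driver out) := by unfold Spec_extract_safelane_status; infer_instance

-- ===== CLAIM (what is proved, stated in full; the proofs are below) =====
def Claim_equal_extract_safelane_status : Prop := ∀ (driver : List (String × String)), Dom_extract_safelane_status driver → Spec_extract_safelane_status driver (extract_safelane_status driver)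

-- ===== LEMMAS AND PROOFS =====

-- the nine relevant keys in slot order
def KEYS9 : List String :=
  ["code", "status", "duty_status", "dutyStatus", "current_status", "currentStatus",
   "log_status", "hos_status", "connection_status"]

-- per-value: the cascade equals one lookup in the merged table (the alias sets are disjoint)
set_option maxRecDepth 4096 in
theorem canon_eq_alias (v : Option String) :
    canonical_status_text v =
      (let raw := PySem.Str.upper (PySem.Str.strip (v.getD ""))
       if raw ≠ "" then STATUS_ALIASES.getD raw raw else "") := by
  simp only [canonical_status_text, STATUS_ALIASES, SAFE_LANE_STATUS_CODE_MAP,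
    PySem.Dict.getD, PySem.Dict.get?, PySem.Dict.contains]
  generalize PySem.Str.upper (PySem.Str.strip (v.getD "")) = raw
  by_cases h0 : raw = ""
  · simp [h0]
  · rw [if_neg h0, if_pos h0]
    simp only [List.any_cons, List.any_nil, Bool.or_eq_true, beq_iff_eq, Bool.false_eq_true, or_false]
    split_ifs with h1 h2 h3 h4 h5 h6 h7
    · rcases h1 with rfl | rfl | rfl | rfl | rfl | rfl <;> rfl
    · rcases h2 with rfl | rfl | rfl <;> rfl
    · rcases h3 with rfl | rfl | rfl <;> rfl
    · rcases h4 with rfl | rfl <;> rfl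
    · rcases h5 with rfl | rfl <;> rfl
    · rcases h6 with rfl | rfl <;> rfl
    · rcases h7 with rfl | rfl <;> rfl
    · simp only [List.find?]
      (repeat' split) <;> simp_all [beq_iff_eq]

-- the merged table never maps a nonempty key to ""
theorem aliases_getD_ne_empty (raw : String) (h : raw ≠ "") :
    STATUS_ALIASES.getD raw raw ≠ "" := by
  simp only [STATUS_ALIASES, PySem.Dict.getD, PySem.Dict.get?, List.find?]
  (repeat' split) <;> simp_all

-- SLOT is the positional index into KEYS9
set_option maxRecDepth 8192 in
theorem slot_spec (k : String) :
    SLOT.get? k = PySem.List.index? KEYS9 k := by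
  by_cases hk : k ∈ KEYS9
  · fin_cases hk <;> rfl
  · have hnone : PySem.List.index? KEYS9 k = none := by
      rw [PySem.List.index?_eq_none_iff]; exact hk
    rw [hnone]
    simp only [SLOT, PySem.Dict.get?]
    have hfind : List.find? (fun p => p.1 == k)
        [("code", 0), ("status", 1), ("duty_status", 2), ("dutyStatus", 3), ("current_status", 4),
         ("currentStatus", 5), ("log_status", 6), ("hos_status", 7), ("connection_status", 8)] = none :=
      List.find?_eq_none.mpr (by
        have hne : ∀ s ∈ KEYS9, ¬(s == k) = true := by
          intro s hs hsk
          rw [beq_iff_eq] at hsk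
          exact hk (hsk ▸ hs)
        intro p hp
        fin_cases hp <;> exact hne _ (by simp [KEYS9]))
    rw [hfind]; rfl

theorem collectSlots_length (driver : List (String × String)) (slots : List (Option String)) :
    (collectSlots driver slots).length = slots.length := by
  induction driver generalizing slots with
  | nil => rfl
  | cons p rest ih =>
      obtain ⟨k, v⟩ := p
      cases hpos : SLOT.get? k <;> simp only [collectSlots, hpos]
      · exact ih slots
      · split
        · rw [ih, List.length_set]
        · exact ih slots

-- the accumulator invariant: slot i of the final state is the initial slot if set,
-- else the first value stored under KEYS9[i] in the remaining items
theorem collectSlots_getD (driver : List (String × String)) (slots : List (Option String))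
    (hlen : slots.length = 9) (i : Nat) (hi : i < 9) :
    (collectSlots driver slots).getD i none =
      ((slots.getD i none).rec ((PySem.Dict.mk driver).get? (KEYS9.getD i "")) some) := by
  induction driver generalizing slots with
  | nil =>
      simp only [collectSlots]
      cases slots.getD i none <;> simp [PySem.Dict.get?]
  | cons p rest ih =>
      obtain ⟨k, v⟩ := p
      have hget : (PySem.Dict.mk ((k, v) :: rest)).get? (KEYS9.getD i "") =
          (if k == KEYS9.getD i "" then some v else (PySem.Dict.mk rest).get? (KEYS9.getD i "")) :=
        PySem.Dict.get?_mk_cons ..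
      have hset_self : (slots.set i (some v)).getD i none = some v := by
        rw [List.getD_eq_getElem?_getD, List.getElem?_set_self', List.getElem?_eq_getElem (by omega)]
        simp
      have hset_ne : ∀ (j : Nat), j ≠ i → (slots.set j (some v)).getD i none = slots.getD i none := by
        intro j hji
        rw [List.getD_eq_getElem?_getD, List.getElem?_set_ne hji, ← List.getD_eq_getElem?_getD]
      cases hpos : SLOT.get? k <;> simp only [collectSlots, hpos]
      · -- k is not a relevant key, so k ≠ KEYS9[i]
        rw [slot_spec, PySem.List.index?_eq_none_iff] at hpos
        have hne : (k == KEYS9.getD i "") = false := by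
          interval_cases i <;> simp_all [KEYS9]
        rw [ih slots hlen, hget, hne]
        simp
      · -- k = KEYS9[j] for the slot index j returned by SLOT
        rename_i j
        rw [slot_spec] at hpos
        obtain ⟨hjlt, hkj, -⟩ := PySem.List.getElem_of_index?_eq_some hpos
        have hj9 : j < 9 := by simpa [KEYS9] using hjlt
        have hkeq : KEYS9.getD j "" = k := by
          rw [List.getD_eq_getElem _ _ hjlt]; exact hkj
        by_cases hij : i = j
        · subst hij
          rw [hget, hkeq]
          simp only [beq_self_eq_true, if_true]
          by_cases hempty : slots.getD i none = none
          · rw [if_pos hempty,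
              ih (slots.set i (some v)) (by rw [List.length_set]; exact hlen), hset_self, hempty]
          · rw [if_neg hempty, ih slots hlen]
            cases hs : slots.getD i none
            · exact absurd hs hempty
            · simp
        · have hne : (k == KEYS9.getD i "") = false := by
            have hdiff : KEYS9.getD i "" ≠ KEYS9.getD j "" := by
              interval_cases i <;> interval_cases j <;>
                first | exact absurd rfl hij | decide
            rw [hkeq] at hdiff
            simp only [beq_eq_false_iff_ne, ne_eq]
            exact fun h => hdiff h.symm
          split
          · rw [ih (slots.set j (some v)) (by rw [List.length_set]; exact hlen),
              hset_ne j (fun h => hij h.symm), hget, hne]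
            simp
          · rw [ih slots hlen, hget, hne]
            simp

-- A's loop over the fetched candidates = B's scan of the candidate slots
theorem loopAB (d : PySem.Dict String String) (cs : List (Option String)) :
    extractLoopA d cs = scanSlotsB cs (d.get? "connection_status") := by
  induction cs with
  | nil =>
      simp [extractLoopA, scanSlotsB, PySem.Dict.getD_eq_get?_getD]
  | cons c cs ih =>
      simp only [extractLoopA, scanSlotsB, canon_eq_alias, ih]
      by_cases hr : PySem.Str.upper (PySem.Str.strip (c.getD "")) = ""
      · simp [hr]
      · simp [hr, aliases_getD_ne_empty _ hr]

-- a length-9 list is its list of getD's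
theorem len9_eta (S : List (Option String)) (h : S.length = 9) :
    S = [S.getD 0 none, S.getD 1 none, S.getD 2 none, S.getD 3 none, S.getD 4 none,
         S.getD 5 none, S.getD 6 none, S.getD 7 none, S.getD 8 none] := by
  obtain ⟨a0, S, rfl⟩ := List.exists_of_length_succ S h
  have h1 : S.length = 8 := by simpa using h
  obtain ⟨a1, S, rfl⟩ := List.exists_of_length_succ S h1
  have h2 : S.length = 7 := by simpa using h1
  obtain ⟨a2, S, rfl⟩ := List.exists_of_length_succ S h2
  have h3 : S.length = 6 := by simpa using h2
  obtain ⟨a3, S, rfl⟩ := List.exists_of_length_succ S h3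
  have h4 : S.length = 5 := by simpa using h3
  obtain ⟨a4, S, rfl⟩ := List.exists_of_length_succ S h4
  have h5 : S.length = 4 := by simpa using h4
  obtain ⟨a5, S, rfl⟩ := List.exists_of_length_succ S h5
  have h6 : S.length = 3 := by simpa using h5
  obtain ⟨a6, S, rfl⟩ := List.exists_of_length_succ S h6
  have h7 : S.length = 2 := by simpa using h6
  obtain ⟨a7, S, rfl⟩ := List.exists_of_length_succ S h7
  have h8 : S.length = 1 := by simpa using h7
  obtain ⟨a8, S, rfl⟩ := List.exists_of_length_succ S h8
  have h9 : S = [] := List.eq_nil_of_length_eq_zero (by simpa using h8)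
  subst h9
  rfl

-- ===== VERDICT (by name: the statement is the Claim_ definition above) =====
theorem extract_safelane_status_spec : Claim_equal_extract_safelane_status := by
  intro driver _
  unfold Spec_extract_safelane_status extract_safelane_status extract_safelane_status_alt
  set d := PySem.Dict.mk driver with hd
  set S := collectSlots driver (List.replicate 9 none) with hS
  have hlen : S.length = 9 := by
    rw [hS, collectSlots_length, List.length_replicate]
  have hslot : ∀ i, i < 9 → S.getD i none = d.get? (KEYS9.getD i "") := by
    intro i hi
    rw [hS, collectSlots_getD driver _ (by simp) i hi]
    have hrep : (List.replicate 9 (none : Option String)).getD i none = none := by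
      rw [List.getD_eq_getElem?_getD, List.getElem?_replicate]
      simp [hi]
    rw [hrep]
  rw [len9_eta S hlen]
  simp only [hslot 0 (by omega), hslot 1 (by omega), hslot 2 (by omega), hslot 3 (by omega),
    hslot 4 (by omega), hslot 5 (by omega), hslot 6 (by omega), hslot 7 (by omega),
    hslot 8 (by omega)]
  rw [show PySem.List.slice
        [d.get? (KEYS9.getD 0 ""), d.get? (KEYS9.getD 1 ""), d.get? (KEYS9.getD 2 ""),
         d.get? (KEYS9.getD 3 ""), d.get? (KEYS9.getD 4 ""), d.get? (KEYS9.getD 5 ""),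
         d.get? (KEYS9.getD 6 ""), d.get? (KEYS9.getD 7 ""), d.get? (KEYS9.getD 8 "")] none (some 8) =
        [d.get? (KEYS9.getD 0 ""), d.get? (KEYS9.getD 1 ""), d.get? (KEYS9.getD 2 ""),
         d.get? (KEYS9.getD 3 ""), d.get? (KEYS9.getD 4 ""), d.get? (KEYS9.getD 5 ""),
         d.get? (KEYS9.getD 6 ""), d.get? (KEYS9.getD 7 "")] from rfl]
  rw [show (PySem.List.pyGet?
        [d.get? (KEYS9.getD 0 ""), d.get? (KEYS9.getD 1 ""), d.get? (KEYS9.getD 2 ""),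
         d.get? (KEYS9.getD 3 ""), d.get? (KEYS9.getD 4 ""), d.get? (KEYS9.getD 5 ""),
         d.get? (KEYS9.getD 6 ""), d.get? (KEYS9.getD 7 ""), d.get? (KEYS9.getD 8 "")]
        (8 : Int)).getD none = d.get? (KEYS9.getD 8 "") from rfl]
  exact loopAB d _
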